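-- pv_equiv track=rewrite | github.com/mariagt02/IML_Labs_2025_MAI | k_ibl.py | modified_plurality
-- ===== SOURCE A (Python) =====
-- from collections import Counter
--
-- def modified_plurality(nearest_outputs):
--     list_app = list(sorted(Counter(nearest_outputs).items(), key=lambda x: x[1], reverse=True))
--     while len(list_app)>1:
--         if list_app[0][1] == list_app[1][1]:
--             nearest_outputs =  nearest_outputs[:-1]
--             list_app = list(sorted(Counter(nearest_outputs).items(), key=lambda x: x[1], reverse=True))
--         else:
--             return list_app[0][0]
--     if len(list_app)==1:
--         return list_app[0][0]
-- ===== SOURCE B (Python) =====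
-- from collections import Counter
--
-- def modified_plurality(nearest_outputs):
--     if not nearest_outputs:
--         return None
--     cnt = Counter(nearest_outputs)
--     m = max(cnt.values())
--     winners = [k for k, c in cnt.items() if c == m]
--     best = winners[0]
--     if len(winners) > 1:
--         last = {}
--         for i, v in enumerate(nearest_outputs):
--             last[v] = i
--         for k in winners:
--             if last[k] < last[best]:
--                 best = k
--     return best
-- ===== Notes on version B (the rewrite author's own statement) =====
-- stated objective: faster
-- what changed: A repeatedly rebuilds a Counter and re-sorts it while the top two counts tie, dropping the last element each round; B computes the same winner in one pass via a closed form: among the keys with maximal count, return the one whose last occurrence in the list comes earliest.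
import Mathlib
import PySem

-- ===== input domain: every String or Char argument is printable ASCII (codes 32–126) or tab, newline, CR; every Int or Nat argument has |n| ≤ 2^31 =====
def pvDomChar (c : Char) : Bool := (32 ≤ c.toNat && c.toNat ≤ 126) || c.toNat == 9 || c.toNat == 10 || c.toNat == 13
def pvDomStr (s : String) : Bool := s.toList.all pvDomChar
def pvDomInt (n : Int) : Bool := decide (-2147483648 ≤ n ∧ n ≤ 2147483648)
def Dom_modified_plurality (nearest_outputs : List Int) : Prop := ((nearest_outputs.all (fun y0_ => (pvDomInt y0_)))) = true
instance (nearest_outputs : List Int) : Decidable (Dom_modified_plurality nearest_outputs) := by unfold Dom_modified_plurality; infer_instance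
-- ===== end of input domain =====

-- B replaces A's repeated recount+sort tie-breaking loop by a one-pass closed form:
-- the winner is the maximal-count key whose last occurrence comes earliest (objective: faster on tie-heavy inputs).

-- ===== PORT A =====
def modified_plurality (nearest_outputs : List Int) : Option Int :=
  let la := PySem.List.sorted (PySem.Dict.counter nearest_outputs).items (fun p => p.2) true
  if h2 : 1 < la.length then
    if (la[0]'(Nat.lt_trans Nat.zero_lt_one h2)).2 == (la[1]'h2).2 then
      modified_plurality (PySem.List.slice nearest_outputs none (some (-1)))
    else some (la[0]'(Nat.lt_trans Nat.zero_lt_one h2)).1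
  else if h1 : la.length = 1 then some (la[0]'(by omega)).1
  else none
termination_by nearest_outputs.length
decreasing_by
  rw [PySem.List.slice_to_neg_one]
  cases hx : nearest_outputs with
  | nil => subst hx; exact absurd h2 (by decide)
  | cons a t => subst hx; simp [List.length_dropLast]

-- ===== PORT B =====
def modified_plurality_alt (nearest_outputs : List Int) : Option Int :=
  if nearest_outputs = [] then none
  else
    let cnt : PySem.Dict Int Int := PySem.Dict.counter nearest_outputs
    -- max(cnt.values()): cnt is nonempty here (the list is nonempty), so Python's max returns; .getD 0 is never the default
    let m : Int := (PySem.List.max? (PySem.Dict.values cnt) (fun v => v)).getD 0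
    let winners : List Int := (cnt.items.filter (fun p => p.2 == m)).map (fun p => p.1)
    match winners with
    | [] => none  -- unreachable: the max count is attained, so Python's winners[0] cannot raise here
    | w0 :: _ =>
      if 1 < winners.length then
        let last : PySem.Dict Int Int :=
          (PySem.List.enumerate nearest_outputs 0).foldl (fun d iv => d.insert iv.2 iv.1) PySem.Dict.empty
        -- 'last[k]' / 'last[best]' are looked up with .getD 0: every winner occurs in the list, so the default is never taken
        some (winners.foldl (fun best k =>
          if PySem.Dict.getD last k 0 < PySem.Dict.getD last best 0 then k else best) w0)
      else some w0

-- ===== PRECONDITION & SPEC =====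
def Spec_modified_plurality (nearest_outputs : List Int) (out : Option Int) : Prop := out = modified_plurality_alt nearest_outputs
instance (nearest_outputs : List Int) (out : Option Int) : Decidable (Spec_modified_plurality nearest_outputs out) := by unfold Spec_modified_plurality; infer_instance

-- ===== CLAIM (what is proved, stated in full; the proofs are below) =====
def Claim_equal_modified_plurality : Prop := ∀ (nearest_outputs : List Int), Dom_modified_plurality nearest_outputs → Spec_modified_plurality nearest_outputs (modified_plurality nearest_outputs)

-- ===== LEMMAS AND PROOFS =====

-- count of k in xs, as the Int the Counter stores
def pvCnt (xs : List Int) (k : Int) : Int := (xs.count k : Int)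
-- the maximal count (what B computes as m)
def pvM (xs : List Int) : Int :=
  (PySem.List.max? (PySem.Dict.values (PySem.Dict.counter xs)) (fun v => v)).getD 0
-- the last-occurrence dict B builds
def pvLastD (xs : List Int) : PySem.Dict Int Int :=
  (PySem.List.enumerate xs 0).foldl (fun d iv => d.insert iv.2 iv.1) PySem.Dict.empty
def pvL (xs : List Int) (k : Int) : Int := (pvLastD xs).getD k 0
theorem pvLastD_concat (ys : List Int) (z : Int) :
    pvLastD (ys ++ [z]) = (pvLastD ys).insert z (ys.length : Int) := by
  unfold pvLastD
  rw [PySem.List.enumerate_append, List.foldl_append]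
  simp [PySem.List.enumerate_cons, PySem.List.enumerate_nil]

theorem pvL_concat (ys : List Int) (z k : Int) :
    pvL (ys ++ [z]) k = if k = z then (ys.length : Int) else pvL ys k := by
  unfold pvL
  rw [pvLastD_concat, PySem.Dict.getD_insert]

theorem pvL_bound (xs : List Int) (k : Int) (hk : k ∈ xs) :
    0 ≤ pvL xs k ∧ pvL xs k < (xs.length : Int) := by
  induction xs using List.reverseRecOn with
  | nil => simp at hk
  | append_singleton ys z ih =>
    rw [pvL_concat]
    by_cases h : k = z
    · simp [h]
    · simp only [if_neg h]
      have hk' : k ∈ ys := by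
        rcases List.mem_append.1 hk with h' | h'
        · exact h'
        · simp at h'; exact absurd h' h
      have := ih hk'
      simp only [List.length_append, List.length_cons, List.length_nil]
      push_cast
      omega

theorem pvL_inj (xs : List Int) (k k' : Int) (hk : k ∈ xs) (hk' : k' ∈ xs) (hne : k ≠ k') :
    pvL xs k ≠ pvL xs k' := by
  induction xs using List.reverseRecOn with
  | nil => simp at hk
  | append_singleton ys z ih =>
    rw [pvL_concat, pvL_concat]
    by_cases h : k = z <;> by_cases h' : k' = z
    · exact absurd (h.trans h'.symm) hne
    · have hk2 : k' ∈ ys := by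
        rcases List.mem_append.1 hk' with h2 | h2
        · exact h2
        · simp at h2; exact absurd h2 h'
      have := (pvL_bound ys k' hk2).2
      simp [h, if_neg h']; omega
    · have hk2 : k ∈ ys := by
        rcases List.mem_append.1 hk with h2 | h2
        · exact h2
        · simp at h2; exact absurd h2 h
      have := (pvL_bound ys k hk2).2
      simp [if_neg h, h']; omega
    · have hk2 : k ∈ ys := by
        rcases List.mem_append.1 hk with h2 | h2
        · exact h2
        · simp at h2; exact absurd h2 h
      have hk2' : k' ∈ ys := by
        rcases List.mem_append.1 hk' with h2 | h2
        · exact h2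
        · simp at h2; exact absurd h2 h'
      simp only [if_neg h, if_neg h']
      exact ih hk2 hk2'


theorem pvValues_counter (xs : List Int) :
    PySem.Dict.values (PySem.Dict.counter xs) = (PySem.Set.ofList xs).map (fun k => pvCnt xs k) := by
  simp [PySem.Dict.values, PySem.Dict.items_counter, pvCnt]

theorem pvM_some (xs : List Int) (hne : xs ≠ []) :
    PySem.List.max? (PySem.Dict.values (PySem.Dict.counter xs)) (fun v => v) = some (pvM xs) := by
  cases h : PySem.List.max? (PySem.Dict.values (PySem.Dict.counter xs)) (fun v => v) with
  | none =>
    rw [PySem.List.max?_eq_none_iff] at h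
    rw [pvValues_counter] at h
    simp at h
    exfalso
    apply hne
    cases hx : xs with
    | nil => rfl
    | cons a t =>
      subst hx
      have ha : a ∈ PySem.Set.ofList (a :: t) := (PySem.Set.mem_ofList _ _).2 (by simp)
      rw [h] at ha
      simp at ha
  | some m => simp [pvM, h]

theorem pvM_isMax (xs : List Int) (k : Int) (hk : k ∈ xs) : pvCnt xs k ≤ pvM xs := by
  have hne : xs ≠ [] := by rintro rfl; simp at hk
  have h := PySem.List.max?_isMax (pvM_some xs hne)
  have : pvCnt xs k ∈ PySem.Dict.values (PySem.Dict.counter xs) := by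
    rw [pvValues_counter]
    exact List.mem_map_of_mem ((PySem.Set.mem_ofList _ _).2 hk)
  simpa using h _ this

theorem pvM_attained (xs : List Int) (hne : xs ≠ []) : ∃ k ∈ xs, pvCnt xs k = pvM xs := by
  have h := PySem.List.max?_mem (pvM_some xs hne)
  rw [pvValues_counter] at h
  rcases List.mem_map.1 h with ⟨k, hk, hkeq⟩
  exact ⟨k, (PySem.Set.mem_ofList _ _).1 hk, hkeq⟩


theorem pvPick (last : PySem.Dict Int Int) (w : Int) :
    ∀ (l : List Int) (u : Int),
      ((w ∈ l ∧ PySem.Dict.getD last w 0 < PySem.Dict.getD last u 0) ∨ u = w) →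
      (∀ k ∈ l, k = w ∨ PySem.Dict.getD last w 0 < PySem.Dict.getD last k 0) →
      l.foldl (fun best k =>
        if PySem.Dict.getD last k 0 < PySem.Dict.getD last best 0 then k else best) u = w := by
  intro l
  induction l with
  | nil =>
    intro u hu _
    rcases hu with ⟨hmem, _⟩ | huw
    · simp at hmem
    · rw [huw]
      rfl
  | cons p t ih =>
    intro u hu hall
    simp only [List.foldl_cons]
    have hall' : ∀ k ∈ t, k = w ∨ PySem.Dict.getD last w 0 < PySem.Dict.getD last k 0 :=
      fun k hk => hall k (by simp [hk])
    rcases hall p (by simp) with hpw | hplt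
    · rcases hu with ⟨hmem, hlt⟩ | huw
      · rw [hpw, if_pos hlt]
        exact ih w (Or.inr rfl) hall'
      · subst huw
        rw [hpw, if_neg (lt_irrefl _)]
        exact ih u (Or.inr rfl) hall'
    · rcases hu with ⟨hmem, hlt⟩ | huw
      · have hpnw : p ≠ w := by
          intro h; rw [h] at hplt; exact absurd hplt (lt_irrefl _)
        have hmem' : w ∈ t := by
          rcases List.mem_cons.1 hmem with h | h
          · exact absurd h.symm hpnw
          · exact h
        by_cases hrep : PySem.Dict.getD last p 0 < PySem.Dict.getD last u 0
        · rw [if_pos hrep]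
          exact ih p (Or.inl ⟨hmem', hplt⟩) hall'
        · rw [if_neg hrep]
          exact ih u (Or.inl ⟨hmem', hlt⟩) hall'
      · subst huw
        rw [if_neg (by omega)]
        exact ih u (Or.inr rfl) hall'

theorem pvExistsMin (f : Int → Int) : ∀ (l : List Int), l ≠ [] → ∃ a ∈ l, ∀ b ∈ l, f a ≤ f b := by
  intro l
  induction l with
  | nil => intro h; exact absurd rfl h
  | cons x t ih =>
    intro _
    cases ht : t with
    | nil => exact ⟨x, by simp⟩
    | cons y s =>
      subst ht
      obtain ⟨a, ha, hmin⟩ := ih (by simp)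
      by_cases hx : f x ≤ f a
      · refine ⟨x, by simp, ?_⟩
        intro b hb
        rcases List.mem_cons.1 hb with rfl | hb
        · exact le_refl _
        · exact le_trans hx (hmin b hb)
      · refine ⟨a, by simp [ha], ?_⟩
        intro b hb
        rcases List.mem_cons.1 hb with rfl | hb
        · omega
        · exact hmin b hb


-- shape of the Counter's items list
theorem pvItems_shape (xs : List Int) (p : Int × Int) (hp : p ∈ (PySem.Dict.counter xs).items) :
    p.1 ∈ xs ∧ p = (p.1, pvCnt xs p.1) := by
  rw [PySem.Dict.items_counter] at hp
  rcases List.mem_map.1 hp with ⟨k, hk, hkeq⟩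
  subst hkeq
  exact ⟨(PySem.Set.mem_ofList _ _).1 hk, rfl⟩

theorem pvItems_mem (xs : List Int) (k : Int) (hk : k ∈ xs) :
    (k, pvCnt xs k) ∈ (PySem.Dict.counter xs).items := by
  rw [PySem.Dict.items_counter]
  exact List.mem_map_of_mem ((PySem.Set.mem_ofList _ _).2 hk)

theorem pvItems_nodup (xs : List Int) : ((PySem.Dict.counter xs).items).Nodup := by
  rw [PySem.Dict.items_counter]
  exact (PySem.Set.nodup_ofList _).map (fun a b h => congrArg Prod.fst h)

theorem pvWinners_mem (xs : List Int) (k : Int) :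
    k ∈ ((PySem.Dict.counter xs).items.filter (fun p => p.2 == pvM xs)).map (fun p => p.1) ↔
      k ∈ xs ∧ pvCnt xs k = pvM xs := by
  constructor
  · intro hk
    rcases List.mem_map.1 hk with ⟨p, hpf, hpk⟩
    rcases List.mem_filter.1 hpf with ⟨hpi, hpm⟩
    obtain ⟨hpx, hps⟩ := pvItems_shape xs p hpi
    have hpm' : p.2 = pvM xs := by simpa using hpm
    subst hpk
    refine ⟨hpx, ?_⟩
    rw [hps] at hpm'
    exact hpm'
  · rintro ⟨hkx, hkM⟩
    refine List.mem_map.2 ⟨(k, pvCnt xs k), ?_, rfl⟩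
    exact List.mem_filter.2 ⟨pvItems_mem xs k hkx, by simp [hkM]⟩

theorem pvB_char (xs : List Int) (w : Int) (hne : xs ≠ []) (hw : w ∈ xs)
    (hwM : pvCnt xs w = pvM xs)
    (hmin : ∀ k ∈ xs, pvCnt xs k = pvM xs → k = w ∨ pvL xs w < pvL xs k) :
    modified_plurality_alt xs = some w := by
  unfold modified_plurality_alt
  rw [if_neg hne]
  have hm : (PySem.List.max? (PySem.Dict.values (PySem.Dict.counter xs)) (fun v => v)).getD 0
      = pvM xs := rfl
  have hlast : (PySem.List.enumerate xs 0).foldl (fun d iv => d.insert iv.2 iv.1) PySem.Dict.empty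
      = pvLastD xs := rfl
  simp only [hm, hlast]
  have hwin : w ∈ ((PySem.Dict.counter xs).items.filter (fun p => p.2 == pvM xs)).map (fun p => p.1) :=
    (pvWinners_mem xs w).2 ⟨hw, hwM⟩
  cases hwl : ((PySem.Dict.counter xs).items.filter (fun p => p.2 == pvM xs)).map (fun p => p.1) with
  | nil => rw [hwl] at hwin; simp at hwin
  | cons w0 rest =>
    show (if 1 < (w0 :: rest).length then
        some ((w0 :: rest).foldl (fun best k =>
          if (pvLastD xs).getD k 0 < (pvLastD xs).getD best 0 then k else best) w0)
      else some w0) = some w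
    have hall : ∀ k ∈ w0 :: rest, k = w ∨ pvL xs w < pvL xs k := by
      intro k hk
      rw [← hwl] at hk
      obtain ⟨hkx, hkM⟩ := (pvWinners_mem xs k).1 hk
      exact hmin k hkx hkM
    by_cases hlen : 1 < (w0 :: rest).length
    · rw [if_pos hlen]
      congr 1
      apply pvPick (pvLastD xs) w (w0 :: rest) w0 _ hall
      rcases hall w0 (by simp) with h | h
      · exact Or.inr h
      · rw [hwl] at hwin
        exact Or.inl ⟨hwin, h⟩
    · rw [if_neg hlen]
      have : rest = [] := by
        cases rest with
        | nil => rfl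
        | cons x y => simp at hlen
      subst this
      rw [hwl] at hwin
      rcases List.mem_singleton.1 hwin with h
      rw [h]

theorem pvW_exists (xs : List Int) (hne : xs ≠ []) :
    ∃ w ∈ xs, pvCnt xs w = pvM xs ∧
      ∀ k ∈ xs, pvCnt xs k = pvM xs → k = w ∨ pvL xs w < pvL xs k := by
  obtain ⟨k0, hk0, hk0M⟩ := pvM_attained xs hne
  have hfil : xs.filter (fun k => pvCnt xs k = pvM xs) ≠ [] := by
    intro h
    have : k0 ∈ xs.filter (fun k => pvCnt xs k = pvM xs) := by
      rw [List.mem_filter]; exact ⟨hk0, by simp [hk0M]⟩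
    rw [h] at this; simp at this
  obtain ⟨w, hwf, hwmin⟩ := pvExistsMin (pvL xs) _ hfil
  rw [List.mem_filter] at hwf
  refine ⟨w, hwf.1, by simpa using hwf.2, ?_⟩
  intro k hk hkM
  by_cases hkw : k = w
  · exact Or.inl hkw
  · right
    have hkf : k ∈ xs.filter (fun k => pvCnt xs k = pvM xs) := by
      rw [List.mem_filter]; exact ⟨hk, by simp [hkM]⟩
    have hle := hwmin k hkf
    have hne2 := pvL_inj xs w k hwf.1 hk (fun h => hkw h.symm)
    omega

theorem pvCnt_concat (ys : List Int) (z k : Int) :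
    pvCnt (ys ++ [z]) k = pvCnt ys k + if k = z then 1 else 0 := by
  unfold pvCnt
  rw [List.count_append]
  by_cases h : k = z
  · simp [h]
  · simp only [if_neg h, add_zero]
    have : List.count k [z] = 0 := List.count_eq_zero.2 (by simp [h])
    simp [this]

theorem pvCnt_pos (xs : List Int) (k : Int) (hk : k ∈ xs) : 1 ≤ pvCnt xs k := by
  unfold pvCnt
  have := List.count_pos_iff.2 hk
  omega

theorem pvB_drop (ys : List Int) (z : Int)
    (k1 k2 : Int) (h1 : k1 ∈ ys ++ [z]) (h2 : k2 ∈ ys ++ [z]) (h12 : k1 ≠ k2)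
    (hM1 : pvCnt (ys ++ [z]) k1 = pvM (ys ++ [z])) (hM2 : pvCnt (ys ++ [z]) k2 = pvM (ys ++ [z])) :
    modified_plurality_alt (ys ++ [z]) = modified_plurality_alt ys := by
  set xs := ys ++ [z] with hxs
  have hnex : xs ≠ [] := by simp [hxs]
  -- an argmax key different from z
  obtain ⟨k0, hk0x, hk0z, hk0M⟩ : ∃ k0, k0 ∈ xs ∧ k0 ≠ z ∧ pvCnt xs k0 = pvM xs := by
    by_cases h : k1 = z
    · exact ⟨k2, h2, fun hz => h12 (h.trans hz.symm), hM2⟩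
    · exact ⟨k1, h1, h, hM1⟩
  have hk0ys : k0 ∈ ys := by
    rcases List.mem_append.1 hk0x with h | h
    · exact h
    · simp at h; exact absurd h hk0z
  have hcnt0 : pvCnt ys k0 = pvCnt xs k0 := by
    rw [hxs, pvCnt_concat, if_neg hk0z, add_zero]
  -- dropping z does not change the maximal count
  have hMM : pvM ys = pvM xs := by
    have hle : pvM ys ≤ pvM xs := by
      obtain ⟨ka, hka, hkaM⟩ := pvM_attained ys (List.ne_nil_of_mem hk0ys)
      have hkax : ka ∈ xs := by rw [hxs]; exact List.mem_append_left _ hka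
      have h1' : pvCnt ys ka ≤ pvCnt xs ka := by
        rw [hxs, pvCnt_concat]; split_ifs <;> omega
      have := pvM_isMax xs ka hkax
      omega
    have hge : pvM xs ≤ pvM ys := by
      have := pvM_isMax ys k0 hk0ys
      omega
    omega
  -- the minimizer of xs
  obtain ⟨w, hwx, hwM, hwmin⟩ := pvW_exists xs hnex
  have hwz : w ≠ z := by
    intro hwzeq
    rcases hwmin k0 hk0x hk0M with h | h
    · exact hk0z (h.trans hwzeq)
    · have hLz : pvL xs z = (ys.length : Int) := by
        rw [hxs, pvL_concat, if_pos rfl]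
      have hLk0 : pvL xs k0 = pvL ys k0 := by
        rw [hxs, pvL_concat, if_neg hk0z]
      have := (pvL_bound ys k0 hk0ys).2
      rw [hwzeq, hLz, hLk0] at h
      omega
  have hcntw : pvCnt ys w = pvCnt xs w := by
    rw [hxs, pvCnt_concat, if_neg hwz, add_zero]
  have hwys : w ∈ ys := by
    have h1' : 1 ≤ pvCnt xs w := pvCnt_pos xs w hwx
    have : 1 ≤ pvCnt ys w := by omega
    unfold pvCnt at this
    have : 0 < ys.count w := by omega
    exact List.count_pos_iff.1 this
  have hA : modified_plurality_alt xs = some w := pvB_char xs w hnex hwx hwM hwmin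
  have hB : modified_plurality_alt ys = some w := by
    apply pvB_char ys w (List.ne_nil_of_mem hwys) hwys (by omega)
    intro k hk hkM
    have hkz : k ≠ z := by
      intro hkz
      have hcz : pvCnt xs z = pvCnt ys z + 1 := by
        rw [hxs, pvCnt_concat, if_pos rfl]
      have hzx : z ∈ xs := by rw [hxs]; exact List.mem_append_right _ (by simp)
      have := pvM_isMax xs z hzx
      rw [hkz] at hkM
      omega
    have hck : pvCnt ys k = pvCnt xs k := by
      rw [hxs, pvCnt_concat, if_neg hkz, add_zero]
    have hkx : k ∈ xs := by rw [hxs]; exact List.mem_append_left _ hk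
    rcases hwmin k hkx (by omega) with h | h
    · exact Or.inl h
    · right
      have hLw : pvL xs w = pvL ys w := by rw [hxs, pvL_concat, if_neg hwz]
      have hLk : pvL xs k = pvL ys k := by rw [hxs, pvL_concat, if_neg hkz]
      omega
  rw [hA, hB]

theorem pv_main (xs0 : List Int) : modified_plurality xs0 = modified_plurality_alt xs0 := by
  suffices H : ∀ (n : Nat) (xs : List Int), xs.length ≤ n →
      modified_plurality xs = modified_plurality_alt xs by
    exact H xs0.length xs0 le_rfl
  intro n
  induction n with
  | zero =>
    intro xs hlen
    have hx : xs = [] := List.eq_nil_of_length_eq_zero (Nat.le_zero.1 hlen)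
    subst hx
    have hla : PySem.List.sorted (PySem.Dict.counter ([] : List Int)).items (fun p => p.2) true = [] := by decide
    rw [modified_plurality]
    simp only [hla]
    norm_num
    rfl
  | succ n ih =>
    intro xs hlen
    cases hla : PySem.List.sorted (PySem.Dict.counter xs).items (fun p => p.2) true with
    | nil =>
      have hx : xs = [] := by
        by_contra hnex
        obtain ⟨k0, hk0, _⟩ := pvM_attained xs hnex
        have hmem : (k0, pvCnt xs k0) ∈
            PySem.List.sorted (PySem.Dict.counter xs).items (fun p => p.2) true :=
          (PySem.List.mem_sorted _ _ _ _).2 (pvItems_mem xs k0 hk0)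
        rw [hla] at hmem
        simp at hmem
      subst hx
      rw [modified_plurality]
      simp only [hla]
      norm_num
      rfl
    | cons a t0 =>
      have hamem : a ∈ (PySem.Dict.counter xs).items := by
        have : a ∈ PySem.List.sorted (PySem.Dict.counter xs).items (fun p => p.2) true := by
          rw [hla]; simp
        exact (PySem.List.mem_sorted _ _ _ _).1 this
      obtain ⟨hax, haeq⟩ := pvItems_shape xs a hamem
      have hnex : xs ≠ [] := List.ne_nil_of_mem hax
      have hheadmax : ∀ y ∈ (PySem.Dict.counter xs).items, y.2 ≤ a.2 :=
        PySem.List.key_head_sorted_rev_ge _ _ hla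
      have haM : a.2 = pvM xs := by
        obtain ⟨k0, hk0, hk0M⟩ := pvM_attained xs hnex
        have hle1 := hheadmax _ (pvItems_mem xs k0 hk0)
        have hle2 := pvM_isMax xs a.1 hax
        have ha2 : a.2 = pvCnt xs a.1 := by rw [haeq]
        simp only at hle1
        omega
      have haMc : pvCnt xs a.1 = pvM xs := by
        have : a.2 = pvCnt xs a.1 := by rw [haeq]
        omega
      cases t0 with
      | nil =>
        have huniq : ∀ k ∈ xs, k = a.1 := by
          intro k hk
          by_contra hkne
          have hmem : (k, pvCnt xs k) ∈
              PySem.List.sorted (PySem.Dict.counter xs).items (fun p => p.2) true :=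
            (PySem.List.mem_sorted _ _ _ _).2 (pvItems_mem xs k hk)
          rw [hla] at hmem
          simp at hmem
          exact hkne (congrArg Prod.fst hmem)
        rw [modified_plurality]
        simp only [hla]
        norm_num
        exact (pvB_char xs a.1 hnex hax haMc (fun k hk _ => Or.inl (huniq k hk))).symm
      | cons b t =>
        have hbmem : b ∈ (PySem.Dict.counter xs).items := by
          have : b ∈ PySem.List.sorted (PySem.Dict.counter xs).items (fun p => p.2) true := by
            rw [hla]; simp
          exact (PySem.List.mem_sorted _ _ _ _).1 this
        obtain ⟨hbx, hbeq⟩ := pvItems_shape xs b hbmem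
        by_cases hab : a.2 = b.2
        · -- tie at the top: A drops the last element; B is stable under that drop
          have hkeys : a.1 ≠ b.1 := by
            have hnd : (PySem.List.sorted (PySem.Dict.counter xs).items (fun p => p.2) true).Nodup :=
              (PySem.List.sorted_perm _ _ _).nodup_iff.2 (pvItems_nodup xs)
            rw [hla] at hnd
            intro h1
            have hone : a = b := by
              rw [haeq, hbeq, h1]
            rcases List.nodup_cons.1 hnd with ⟨hna, _⟩
            exact hna (by rw [hone]; simp)
          have hMb : pvCnt xs b.1 = pvM xs := by
            have : b.2 = pvCnt xs b.1 := by rw [hbeq]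
            omega
          have hstep : modified_plurality xs =
              modified_plurality (PySem.List.slice xs none (some (-1))) := by
            rw [modified_plurality]
            simp only [hla]
            simp [hab]
          rcases (List.eq_nil_or_concat xs) with hxe | ⟨ys, z, hxz⟩
          · exact absurd hxe hnex
          · subst hxz
            rw [List.concat_eq_append] at hstep hax hbx haMc hMb hlen ⊢
            rw [hstep, PySem.List.slice_to_neg_one, List.dropLast_concat]
            have hylen : ys.length ≤ n := by
              have := hlen
              simp [List.length_append] at this
              omega
            rw [ih ys hylen]
            exact (pvB_drop ys z a.1 b.1 hax hbx hkeys haMc hMb).symm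
        · -- unique top: A returns the head key, which is the unique argmax
          have hstep : modified_plurality xs = some a.1 := by
            rw [modified_plurality]
            simp only [hla]
            simp [hab]
          rw [hstep]
          have hpw : (PySem.List.sorted (PySem.Dict.counter xs).items (fun p => p.2) true).Pairwise
              (fun p q => q.2 ≤ p.2) := PySem.List.sorted_pairwise_rev _ _
          rw [hla] at hpw
          have hmin : ∀ k ∈ xs, pvCnt xs k = pvM xs → k = a.1 ∨ pvL xs a.1 < pvL xs k := by
            intro k hk hkM
            left
            by_contra hkne
            have hmem : (k, pvCnt xs k) ∈
                PySem.List.sorted (PySem.Dict.counter xs).items (fun p => p.2) true :=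
              (PySem.List.mem_sorted _ _ _ _).2 (pvItems_mem xs k hk)
            rw [hla] at hmem
            rcases List.mem_cons.1 hmem with hk1 | hmem2
            · exact hkne (congrArg Prod.fst hk1.symm).symm
            · rcases List.pairwise_cons.1 hpw with ⟨hrel_a, hpw2⟩
              rcases List.pairwise_cons.1 hpw2 with ⟨hrel_b, _⟩
              rcases List.mem_cons.1 hmem2 with hk2 | hk3
              · -- (k, cnt k) = b, so b.2 = pvM = a.2, contradiction
                have : b.2 = pvCnt xs k := by rw [← hk2]
                omega
              · have h1 := hrel_b _ hk3
                have h3 := hrel_a b (by simp)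
                simp only at h1
                omega
          exact (pvB_char xs a.1 hnex hax haMc hmin).symm

-- ===== VERDICT (by name: the statement is the Claim_ definition above) =====
theorem modified_plurality_spec : Claim_equal_modified_plurality := by
  intro xs _
  unfold Spec_modified_plurality
  exact pv_main xs
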